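-- pv_equiv track=rewrite | github.com/KumarAmbuj/gfg_hashing_intermediate | 19.distributing.py | distributing
-- ===== SOURCE A (Python) =====
-- def distributing(arr,k):
--     hash=dict()
--
--     for x in arr:
--         if x in hash:
--             hash[x]+=1
--         else:
--             hash[x]=1
--
--     for x, y in hash.items():
--         if y>2*k:
--             return False
--
--     return True
-- ===== SOURCE B (Python) =====
-- def distributing(arr, k):
--     s = sorted(arr)
--     limit = 2 * k
--     n = len(s)
--     i = 0
--     while i < n:
--         j = i + 1
--         while j < n and s[j] == s[i]:
--             j += 1
--         if j - i > limit:
--             return False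
--         i = j
--     return True
-- ===== Notes on version B (the rewrite author's own statement) =====
-- stated objective: alternative
-- what changed: Replaced A's hash counting (build a dict of counts, then scan its items) with sort-then-scan: sort the list and measure each run of equal elements, failing when a run is longer than 2k; no dictionary at all.
import Mathlib
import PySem

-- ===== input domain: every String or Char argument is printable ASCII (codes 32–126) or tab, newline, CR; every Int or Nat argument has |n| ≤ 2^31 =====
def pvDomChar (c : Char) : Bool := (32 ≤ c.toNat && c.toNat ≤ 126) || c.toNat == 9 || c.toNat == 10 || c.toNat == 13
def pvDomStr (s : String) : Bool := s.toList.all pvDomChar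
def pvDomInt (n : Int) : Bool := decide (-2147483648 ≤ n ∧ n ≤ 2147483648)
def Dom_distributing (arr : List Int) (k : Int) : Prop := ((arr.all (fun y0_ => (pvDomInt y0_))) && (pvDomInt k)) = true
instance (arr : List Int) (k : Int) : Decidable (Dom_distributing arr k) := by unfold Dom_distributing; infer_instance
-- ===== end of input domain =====

-- B replaces A's hash-count-then-scan with sort-then-run-length-scan: no dictionary; same return value everywhere.

-- ===== PORT A =====
-- the second loop of A: scan the dict items, early-return False on a count > 2k
def distScan (k : Int) : List (Int × Int) → Bool
  | [] => true
  | (_, y) :: rest => if y > 2 * k then false else distScan k rest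

def distributing (arr : List Int) (k : Int) : Bool :=
  let hash := arr.foldl
    (fun d x => if d.contains x then d.insert x (d.getD x 0 + 1) else d.insert x 1)
    PySem.Dict.empty
  distScan k hash.items

-- ===== PORT B =====
-- B's outer while loop over the sorted list: the inner while loop that advances j past
-- the run of elements equal to s[i] is the takeWhile/dropWhile split of the suffix;
-- return False when a run is longer than 2*k, else continue after the run.
def runScan (limit : Int) : List Int → Bool
  | [] => true
  | x :: xs =>
    if ((xs.takeWhile (fun y => y == x)).length + 1 : Int) > limit then false
    else runScan limit (xs.dropWhile (fun y => y == x))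
termination_by l => l.length
decreasing_by
  simpa using Nat.lt_succ_of_le (List.length_dropWhile_le _ _)

def distributing_alt (arr : List Int) (k : Int) : Bool :=
  runScan (2 * k) (PySem.List.sorted arr (fun x => x) false)

-- ===== PRECONDITION & SPEC =====
def Spec_distributing (arr : List Int) (k : Int) (out : Bool) : Prop := out = distributing_alt arr k
instance (arr : List Int) (k : Int) (out : Bool) : Decidable (Spec_distributing arr k out) := by unfold Spec_distributing; infer_instance

-- ===== CLAIM (what is proved, stated in full; the proofs are below) =====
def Claim_equal_distributing : Prop := ∀ (arr : List Int) (k : Int), Dom_distributing arr k → Spec_distributing arr k (distributing arr k)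

-- ===== LEMMAS AND PROOFS =====

-- A's branching insert is the plain counting insert (when the key is absent getD gives 0)
lemma foldA_eq_counter (arr : List Int) :
    arr.foldl
      (fun d x => if d.contains x then d.insert x (d.getD x 0 + 1) else d.insert x 1)
      PySem.Dict.empty = PySem.Dict.counter arr := by
  rw [← PySem.Dict.foldl_insert_getD_add_one_eq_counter]
  congr 1
  funext d x
  by_cases h : d.contains x = true
  · simp [h]
  · have h0 : d.getD x 0 = 0 := PySem.Dict.getD_of_not_contains d 0 (by simpa using h)
    simp [h, h0]

lemma distScan_true_iff (k : Int) (l : List (Int × Int)) :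
    distScan k l = true ↔ ∀ p ∈ l, p.2 ≤ 2 * k := by
  induction l with
  | nil => simp [distScan]
  | cons p rest ih =>
    obtain ⟨x, y⟩ := p
    by_cases h : y > 2 * k
    · simp only [distScan, if_pos h, Bool.false_eq_true, false_iff]
      push Not
      exact ⟨(x, y), List.mem_cons_self .., by simpa using h⟩
    · simp only [distScan, if_neg h, ih]
      constructor
      · intro h2 q hq
        rcases List.mem_cons.mp hq with rfl | hm
        · simpa using (by omega : y ≤ 2 * k)
        · exact h2 q hm
      · exact fun h2 q hq => h2 q (List.mem_cons_of_mem _ hq)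

-- characterisation of A
lemma distributing_true_iff (arr : List Int) (k : Int) :
    distributing arr k = true ↔ ∀ v ∈ arr, (arr.count v : Int) ≤ 2 * k := by
  unfold distributing
  rw [foldA_eq_counter, distScan_true_iff]
  simp [PySem.Dict.items_counter, PySem.Set.mem_ofList]

-- in a sorted list x :: xs, the head value does not occur after its leading run
lemma not_mem_dropWhile_of_sorted (x : Int) (xs : List Int)
    (hs : (x :: xs).Pairwise (· ≤ ·)) :
    x ∉ xs.dropWhile (fun y => y == x) := by
  intro hmem
  have hd := List.dropWhile_sublist (p := fun y => y == x) (l := xs)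
  have hpxs : xs.Pairwise (· ≤ ·) := (List.pairwise_cons.mp hs).2
  have hxle : ∀ y ∈ xs, x ≤ y := (List.pairwise_cons.mp hs).1
  cases hdw : xs.dropWhile (fun y => y == x) with
  | nil => simp [hdw] at hmem
  | cons y0 rest =>
    have hy0ne : (y0 == x) = false := by
      have := List.head?_dropWhile_not (p := fun y => y == x) (l := xs)
      rw [hdw] at this; simpa using this
    have hy0x : y0 ≠ x := by simpa using hy0ne
    have hsub : (y0 :: rest).Sublist xs := hdw ▸ hd
    have hpd : (y0 :: rest).Pairwise (· ≤ ·) := hpxs.sublist hsub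
    rw [hdw] at hmem
    rcases List.mem_cons.mp hmem with rfl | hr
    · exact hy0x rfl
    · have h1 : y0 ≤ x := (List.pairwise_cons.mp hpd).1 x hr
      have h2 : x ≤ y0 := hxle y0 (hsub.mem (List.mem_cons_self ..))
      exact hy0x (le_antisymm h1 h2)

-- run scan on a sorted list ↔ every element's count is within the limit
lemma runScan_true_iff (limit : Int) : ∀ (l : List Int), l.Pairwise (· ≤ ·) →
    (runScan limit l = true ↔ ∀ v ∈ l, (l.count v : Int) ≤ limit) := by
  intro l
  induction l using (measure List.length).wf.induction with
  | _ l ih =>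
  match l with
  | [] => intro _; simp [runScan]
  | x :: xs =>
    intro hs
    set t := xs.takeWhile (fun y => y == x) with ht
    set d := xs.dropWhile (fun y => y == x) with hd
    have hxs : t ++ d = xs := List.takeWhile_append_dropWhile ..
    have htx : ∀ y ∈ t, y = x := by
      intro y hy
      have := List.mem_takeWhile_imp hy
      simpa using this
    have hxd : x ∉ d := not_mem_dropWhile_of_sorted x xs hs
    have hpd : d.Pairwise (· ≤ ·) :=
      ((List.pairwise_cons.mp hs).2).sublist (List.dropWhile_sublist ..)
    have hlen : d.length < (x :: xs).length := by
      have h := List.length_dropWhile_le (p := fun y => y == x) (l := xs)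
      have h2 : d.length ≤ xs.length := hd ▸ h
      simp only [List.length_cons]
      omega
    -- count of x in the whole list is the run length
    have hcx : (x :: xs).count x = t.length + 1 := by
      have h1 : t.count x = t.length := by
        rw [List.count_eq_length]
        intro y hy; exact ((htx y hy).symm)
      have h2 : d.count x = 0 := List.count_eq_zero.mpr hxd
      rw [List.count_cons_self, ← hxs, List.count_append, h1, h2]
    -- count of v ≠ x in the whole list equals its count in d
    have hcv : ∀ v, v ≠ x → (x :: xs).count v = d.count v := by
      intro v hv
      have h1 : t.count v = 0 := List.count_eq_zero.mpr (fun hm => hv (htx v hm))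
      have hstep : List.count v (x :: xs) = List.count v xs := by
        simp [Ne.symm hv]
      rw [hstep, ← hxs, List.count_append, h1, Nat.zero_add]
    by_cases hbig : ((t.length + 1 : Int) > limit)
    · simp only [runScan, ← ht, if_pos hbig, Bool.false_eq_true, false_iff]
      push Not
      refine ⟨x, List.mem_cons_self .., ?_⟩
      rw [hcx]; push_cast; omega
    · have ihd := ih d hlen hpd
      simp only [runScan, ← ht, ← hd, if_neg hbig, ihd]
      constructor
      · intro h2 v hv
        rcases List.mem_cons.mp hv with rfl | hvxs
        · rw [hcx]; push_cast; omega
        · by_cases hvx : v = x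
          · subst hvx; rw [hcx]; push_cast; omega
          · rw [hcv v hvx]
            by_cases hvd : v ∈ d
            · exact le_trans (by exact_mod_cast Nat.le_refl _) (h2 v hvd)
            · rw [List.count_eq_zero.mpr hvd]; push_cast; omega
      · intro h2 v hvd
        have hvx : v ≠ x := fun h => hxd (h ▸ hvd)
        have hvl : v ∈ x :: xs := by
          rw [← hxs] at *
          exact List.mem_cons_of_mem _ (List.mem_append_right _ hvd)
        have := h2 v hvl
        rwa [hcv v hvx] at this

-- characterisation of B
lemma distributing_alt_true_iff (arr : List Int) (k : Int) :
    distributing_alt arr k = true ↔ ∀ v ∈ arr, (arr.count v : Int) ≤ 2 * k := by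
  unfold distributing_alt
  have hperm : (PySem.List.sorted arr (fun x => x) false).Perm arr :=
    PySem.List.sorted_perm ..
  have hpw : (PySem.List.sorted arr (fun x => x) false).Pairwise (· ≤ ·) := by
    simpa using PySem.List.sorted_pairwise (xs := arr) (key := fun x => x)
  rw [runScan_true_iff (2 * k) _ hpw]
  constructor
  · intro h v hv
    have := h v (hperm.mem_iff.mpr hv)
    rwa [hperm.count_eq] at this
  · intro h v hv
    rw [hperm.count_eq]
    exact h v (hperm.mem_iff.mp hv)

-- ===== VERDICT (by name: the statement is the Claim_ definition above) =====
theorem distributing_spec : Claim_equal_distributing := by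
  intro arr k _
  unfold Spec_distributing
  rw [Bool.eq_iff_iff, distributing_true_iff, distributing_alt_true_iff]
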